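-- pv_equiv track=rewrite | github.com/ClemensKubach/text-cleaning | src/text_cleaning/statistical_analysis/error_analysis.py | detect_visual_errors
-- ===== SOURCE A (Python) =====
-- VISUAL_PATTERNS = {"rn": "m", "cl": "d", "vv": "w", "m": "rn", "d": "cl", "w": "vv"}
--
-- def detect_visual_errors(ocr_word, gt_word, visual_mistakes_matches) -> dict:
--     for pattern, true_char in VISUAL_PATTERNS.items():
--         i = 0
--         while i < len(ocr_word) and i < len(gt_word):
--             if len(pattern) == 2:
--                 if ocr_word[i : i + 2] == pattern and gt_word[i] == true_char:
--                     visual_mistakes_matches[(pattern, true_char)] += 1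
--             else:
--                 if gt_word[i : i + 2] == true_char and ocr_word[i] == pattern:
--                     visual_mistakes_matches[(pattern, true_char)] += 1
--             i += 1
--
--     return visual_mistakes_matches
-- ===== SOURCE B (Python) =====
-- VISUAL_PATTERNS = {"rn": "m", "cl": "d", "vv": "w", "m": "rn", "d": "cl", "w": "vv"}
--
-- def detect_visual_errors(ocr_word, gt_word, visual_mistakes_matches) -> dict:
--     # One positional sweep collecting the matched (pattern, true_char) events,
--     # then one bulk pass applying them to the counter dict.
--     hits = []
--     for i in range(min(len(ocr_word), len(gt_word))):
--         two = ocr_word[i : i + 2]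
--         tc = VISUAL_PATTERNS.get(two)
--         if tc is not None and gt_word[i] == tc:
--             hits.append((two, tc))
--         one = ocr_word[i]
--         tc = VISUAL_PATTERNS.get(one)
--         if tc is not None and gt_word[i : i + 2] == tc:
--             hits.append((one, tc))
--     for key in hits:
--         visual_mistakes_matches[key] += 1
--     return visual_mistakes_matches
-- ===== Notes on version B (the rewrite author's own statement) =====
-- stated objective: simpler
-- what changed: A runs six separate whole-word scans, one per VISUAL_PATTERNS entry; B makes a single positional sweep that collects all matched (pattern, true_char) events into a list and then applies them to the counter dict in one bulk pass (one scan instead of six).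
-- outside the precondition, e.g. on detect_visual_errors('rn', 'm', {}): A raises KeyError, B raises KeyError
import Mathlib
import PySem

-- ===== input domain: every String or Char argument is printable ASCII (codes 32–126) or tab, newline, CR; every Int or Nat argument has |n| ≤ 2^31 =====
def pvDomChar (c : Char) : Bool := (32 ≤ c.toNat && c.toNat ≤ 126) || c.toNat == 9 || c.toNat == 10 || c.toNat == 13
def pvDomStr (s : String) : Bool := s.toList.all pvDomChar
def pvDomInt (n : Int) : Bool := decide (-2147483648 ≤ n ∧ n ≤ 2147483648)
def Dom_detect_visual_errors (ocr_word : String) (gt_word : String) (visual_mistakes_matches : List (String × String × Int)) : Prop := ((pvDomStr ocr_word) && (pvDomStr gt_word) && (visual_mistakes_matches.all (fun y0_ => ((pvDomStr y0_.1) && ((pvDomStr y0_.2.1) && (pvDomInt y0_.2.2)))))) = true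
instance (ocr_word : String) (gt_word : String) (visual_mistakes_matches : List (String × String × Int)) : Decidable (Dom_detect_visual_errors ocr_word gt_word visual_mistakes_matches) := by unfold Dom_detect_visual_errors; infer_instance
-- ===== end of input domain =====

-- B replaces A's six per-pattern scans by one positional sweep collecting matched (pattern, true_char)
-- events plus one bulk update pass (objective: simpler).  Both A and B mutate the dict argument in
-- place in Python; the equivalence proved here is about the RETURN value (= that dict's final items).

-- the module-level constant VISUAL_PATTERNS (a Python dict)
def pvVP : PySem.Dict String String :=
  PySem.Dict.ofList [("rn","m"),("cl","d"),("vv","w"),("m","rn"),("d","cl"),("w","vv")]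

-- ===== PORT A =====
-- `visual_mistakes_matches[(p, t)] += 1`: dict-increment at the first entry with key (p, t).
-- Python raises KeyError when the key is absent; Pre_ excludes those inputs, and there the
-- port leaves the list unchanged.
def pvDictIncrA (p t : String) : List (String × String × Int) → List (String × String × Int)
  | [] => []
  | e :: rest =>
      if e.1 == p && e.2.1 == t then (e.1, e.2.1, e.2.2 + 1) :: rest
      else e :: pvDictIncrA p t rest

-- A's `while i < len(ocr_word) and i < len(gt_word)` counting i up from 0 is the fold over
-- range(min(len, len)); string slices/indexing go through PySem on the char lists
-- (`gt_word[i] == true_char` compares the 1-char string, hence the String.singleton wrapping).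
def detect_visual_errors (ocr_word : String) (gt_word : String) (visual_mistakes_matches : List (String × String × Int)) : List (String × String × Int) :=
  let oc := ocr_word.toList
  let gt := gt_word.toList
  (PySem.Dict.items pvVP).foldl (fun acc pt =>
    (List.range (min oc.length gt.length)).foldl (fun acc2 (i : Nat) =>
      if pt.1.length = 2 then
        if (PySem.List.slice oc (some (i:Int)) (some ((i:Int)+2)) == pt.1.toList) &&
           ((PySem.List.pyGet? gt (i:Int)).map String.singleton == some pt.2) then
          pvDictIncrA pt.1 pt.2 acc2
        else acc2
      else
        if (PySem.List.slice gt (some (i:Int)) (some ((i:Int)+2)) == pt.2.toList) &&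
           ((PySem.List.pyGet? oc (i:Int)).map String.singleton == some pt.1) then
          pvDictIncrA pt.1 pt.2 acc2
        else acc2) acc) visual_mistakes_matches

-- ===== PORT B =====
-- `visual_mistakes_matches[key] += 1` for a key pair (KeyError excluded by Pre_, as for A).
def pvDictIncrB (k : String × String) : List (String × String × Int) → List (String × String × Int)
  | [] => []
  | e :: rest =>
      if (e.1, e.2.1) == k then (e.1, e.2.1, e.2.2 + 1) :: rest
      else e :: pvDictIncrB k rest

-- one sweep collecting hit events (`VISUAL_PATTERNS.get` is the Dict lookup; `ocr_word[i]`,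
-- in range for i < min of the lengths, is matched through pyGet?), then the bulk pass.
def detect_visual_errors_alt (ocr_word : String) (gt_word : String) (visual_mistakes_matches : List (String × String × Int)) : List (String × String × Int) :=
  let oc := ocr_word.toList
  let gt := gt_word.toList
  let hits := (List.range (min oc.length gt.length)).foldl (fun hs (i : Nat) =>
    let two := String.ofList (PySem.List.slice oc (some (i:Int)) (some ((i:Int)+2)))
    let hs1 := match pvVP.get? two with
      | some tc =>
          if (PySem.List.pyGet? gt (i:Int)).map String.singleton == some tc then hs ++ [(two, tc)] else hs
      | none => hs
    match (PySem.List.pyGet? oc (i:Int)).map String.singleton with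
    | some one =>
        match pvVP.get? one with
        | some tc =>
            if String.ofList (PySem.List.slice gt (some (i:Int)) (some ((i:Int)+2))) == tc then hs1 ++ [(one, tc)] else hs1
        | none => hs1
    | none => hs1) []
  hits.foldl (fun acc k => pvDictIncrB k acc) visual_mistakes_matches

-- ===== PRECONDITION & SPEC =====
-- pvHit oc gt p t i: pattern (p, t) of VISUAL_PATTERNS fires at position i (exactly A's two tests)
def pvHit (oc gt : List Char) (p t : String) (i : Nat) : Bool :=
  if p.length = 2 then
    (PySem.List.slice oc (some (i:Int)) (some ((i:Int)+2)) == p.toList) &&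
    ((PySem.List.pyGet? gt (i:Int)).map String.singleton == some t)
  else
    (PySem.List.slice gt (some (i:Int)) (some ((i:Int)+2)) == t.toList) &&
    ((PySem.List.pyGet? oc (i:Int)).map String.singleton == some p)

-- Pre_ excludes (a) association lists with duplicate (pattern, true_char) keys, which a Python dict
-- cannot hold, and (b) inputs where some visual pattern fires at a position but its key is missing
-- from the dict: there Python's `+= 1` raises KeyError (in A and in B alike).
def Pre_detect_visual_errors (ocr_word : String) (gt_word : String) (visual_mistakes_matches : List (String × String × Int)) : Prop :=
  (visual_mistakes_matches.map (fun e => (e.1, e.2.1))).Nodup ∧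
  ∀ pt ∈ ([("rn","m"),("cl","d"),("vv","w"),("m","rn"),("d","cl"),("w","vv")] : List (String × String)),
    (∃ i ∈ List.range (min ocr_word.toList.length gt_word.toList.length),
        pvHit ocr_word.toList gt_word.toList pt.1 pt.2 i) →
    pt ∈ visual_mistakes_matches.map (fun e => (e.1, e.2.1))
instance (ocr_word : String) (gt_word : String) (visual_mistakes_matches : List (String × String × Int)) : Decidable (Pre_detect_visual_errors ocr_word gt_word visual_mistakes_matches) := by unfold Pre_detect_visual_errors; infer_instance

def pvWitness_detect_visual_errors : String × String × (List (String × String × Int)) :=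
  ("rn", "m", [("rn", "m", 3)])

def Spec_detect_visual_errors (ocr_word : String) (gt_word : String) (visual_mistakes_matches : List (String × String × Int)) (out : List (String × String × Int)) : Prop := out = detect_visual_errors_alt ocr_word gt_word visual_mistakes_matches
instance (ocr_word : String) (gt_word : String) (visual_mistakes_matches : List (String × String × Int)) (out : List (String × String × Int)) : Decidable (Spec_detect_visual_errors ocr_word gt_word visual_mistakes_matches out) := by unfold Spec_detect_visual_errors; infer_instance

-- ===== CLAIM (what is proved, stated in full; the proofs are below) =====
def Claim_equal_detect_visual_errors : Prop := ∀ (ocr_word : String) (gt_word : String) (visual_mistakes_matches : List (String × String × Int)), Dom_detect_visual_errors ocr_word gt_word visual_mistakes_matches → Pre_detect_visual_errors ocr_word gt_word visual_mistakes_matches → Spec_detect_visual_errors ocr_word gt_word visual_mistakes_matches (detect_visual_errors ocr_word gt_word visual_mistakes_matches)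

-- ===== LEMMAS AND PROOFS =====

-- add g (e.1, e.2.1) to every entry's count: the common normal form of both programs
def pvAddFn (g : String × String → Int) (l : List (String × String × Int)) : List (String × String × Int) :=
  l.map (fun e => (e.1, e.2.1, e.2.2 + g (e.1, e.2.1)))

-- keys of an association list
def pvKeys (l : List (String × String × Int)) : List (String × String) :=
  l.map (fun e => (e.1, e.2.1))

theorem pvVP_get? (x : String) : pvVP.get? x =
    if "rn" == x then some "m" else if "cl" == x then some "d" else if "vv" == x then some "w"
    else if "m" == x then some "rn" else if "d" == x then some "cl" else if "w" == x then some "vv"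
    else none := by
  have h : pvVP = PySem.Dict.mk [("rn","m"),("cl","d"),("vv","w"),("m","rn"),("d","cl"),("w","vv")] := by decide
  rw [h]; simp only [PySem.Dict.get?_mk_cons]; rfl

theorem pvKeys_addFn (g : String × String → Int) (l : List (String × String × Int)) :
    pvKeys (pvAddFn g l) = pvKeys l := by
  simp [pvKeys, pvAddFn]

theorem pvAddFn_zero (l : List (String × String × Int)) : pvAddFn (fun _ => 0) l = l := by
  simp [pvAddFn]

theorem pvAddFn_congr {g g' : String × String → Int} (h : ∀ k, g k = g' k)
    (l : List (String × String × Int)) : pvAddFn g l = pvAddFn g' l := by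
  simp [pvAddFn, h]

theorem pvAddFn_comp (g g' : String × String → Int) (l : List (String × String × Int)) :
    pvAddFn g (pvAddFn g' l) = pvAddFn (fun k => g' k + g k) l := by
  simp only [pvAddFn, List.map_map]
  apply List.map_congr_left
  intro e _
  simp [add_assoc]

theorem pvIncrB_eq (k0 : String × String) (l : List (String × String × Int)) (h : (pvKeys l).Nodup) :
    pvDictIncrB k0 l = pvAddFn (fun k => if k = k0 then 1 else 0) l := by
  induction l with
  | nil => rfl
  | cons e rest ih =>
      simp only [pvKeys, List.map_cons, List.nodup_cons] at h
      by_cases he : (e.1, e.2.1) = k0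
      · have hrest : pvAddFn (fun k => if k = k0 then 1 else 0) rest = rest := by
          unfold pvAddFn
          conv_rhs => rw [← List.map_id rest]
          apply List.map_congr_left
          intro e' he'
          have hne : (e'.1, e'.2.1) ≠ k0 := by
            intro hkey
            apply h.1
            rw [he, ← hkey]
            exact List.mem_map_of_mem he'
          simp [hne]
        simp only [pvDictIncrB, pvAddFn, List.map_cons]
        rw [if_pos (show ((e.1, e.2.1) == k0) = true by simp [he]), if_pos he]
        exact congrArg₂ List.cons rfl hrest.symm
      · have hb : ((e.1, e.2.1) == k0) = false := by simp [he]
        simp only [pvDictIncrB, pvAddFn, List.map_cons, hb, Bool.false_eq_true, if_false,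
          if_neg he, add_zero]
        exact congrArg₂ List.cons rfl (ih h.2)

theorem pvIncrA_eq (p t : String) (l : List (String × String × Int)) (h : (pvKeys l).Nodup) :
    pvDictIncrA p t l = pvAddFn (fun k => if k = (p, t) then 1 else 0) l := by
  have hab : ∀ m : List (String × String × Int), pvDictIncrA p t m = pvDictIncrB (p, t) m := by
    intro m
    induction m with
    | nil => rfl
    | cons e rest ih =>
        by_cases h1 : e.1 = p <;> by_cases h2 : e.2.1 = t <;>
          simp [pvDictIncrA, pvDictIncrB, h1, h2, ih, Prod.ext_iff]
  rw [hab]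
  exact pvIncrB_eq (p, t) l h

theorem pvCondFold (c : Nat → Bool) (p t : String) (r : List Nat) :
    ∀ l, (pvKeys l).Nodup →
    r.foldl (fun acc i => if c i then pvDictIncrA p t acc else acc) l
      = pvAddFn (fun k => if k = (p, t) then (r.countP c : Int) else 0) l := by
  induction r with
  | nil =>
      intro l h
      simp only [List.foldl_nil, List.countP_nil, Nat.cast_zero, ite_self]
      rw [pvAddFn_congr (g' := fun _ => 0) (by intro k; simp) l, pvAddFn_zero]
  | cons i r ih =>
      intro l h
      simp only [List.foldl_cons, List.countP_cons]
      by_cases hc : c i = true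
      · rw [if_pos hc, pvIncrA_eq p t l h,
          ih _ (by rw [pvKeys_addFn]; exact h), pvAddFn_comp]
        apply pvAddFn_congr
        intro k
        by_cases hk : k = (p, t)
        · simp only [hk, hc, if_true]
          push_cast
          ring
        · simp [hk]
      · rw [if_neg hc, ih _ h]
        apply pvAddFn_congr
        intro k
        simp [hc]

theorem pvFoldIncrB (evs : List (String × String)) :
    ∀ l, (pvKeys l).Nodup →
    evs.foldl (fun acc k => pvDictIncrB k acc) l
      = pvAddFn (fun k => (evs.count k : Int)) l := by
  induction evs with
  | nil =>
      intro l h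
      simp only [List.foldl_nil, List.count_nil, Nat.cast_zero]
      rw [pvAddFn_congr (g' := fun _ => 0) (by intro k; simp) l, pvAddFn_zero]
  | cons k0 evs ih =>
      intro l h
      simp only [List.foldl_cons]
      rw [pvIncrB_eq k0 l h, ih _ (by rw [pvKeys_addFn]; exact h), pvAddFn_comp]
      apply pvAddFn_congr
      intro k
      by_cases hk : k = k0
      · simp only [List.count_cons, hk, beq_self_eq_true, if_true]
        push_cast
        ring
      · simp [hk, Ne.symm hk]

theorem pvOfEq (s : List Char) (t : String) : (String.ofList s = t) ↔ (s = t.toList) := by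
  constructor
  · intro h; have := congrArg String.toList h; simpa using this
  · intro h; subst h; simp

theorem pvEqOf' (t : String) (s : List Char) : (t = String.ofList s) ↔ (s = t.toList) := by
  rw [eq_comm]; exact pvOfEq s t

theorem pvSingEq (c : Char) (t : String) : (String.singleton c = t) ↔ ([c] = t.toList) := by
  simpa using pvOfEq [c] t

theorem pvEqSing (t : String) (c : Char) : (t = String.singleton c) ↔ ([c] = t.toList) := by
  simpa using pvEqOf' t [c]

-- pvHit unfolded at the six pattern pairs
theorem pvHitRN (oc gt : List Char) (i : Nat) : pvHit oc gt "rn" "m" i =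
    ((PySem.List.slice oc (some (i:Int)) (some ((i:Int)+2)) == ("rn":String).toList) &&
     ((PySem.List.pyGet? gt (i:Int)).map String.singleton == some "m")) := by
  unfold pvHit; rw [if_pos (by decide)]

theorem pvHitCL (oc gt : List Char) (i : Nat) : pvHit oc gt "cl" "d" i =
    ((PySem.List.slice oc (some (i:Int)) (some ((i:Int)+2)) == ("cl":String).toList) &&
     ((PySem.List.pyGet? gt (i:Int)).map String.singleton == some "d")) := by
  unfold pvHit; rw [if_pos (by decide)]

theorem pvHitVV (oc gt : List Char) (i : Nat) : pvHit oc gt "vv" "w" i =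
    ((PySem.List.slice oc (some (i:Int)) (some ((i:Int)+2)) == ("vv":String).toList) &&
     ((PySem.List.pyGet? gt (i:Int)).map String.singleton == some "w")) := by
  unfold pvHit; rw [if_pos (by decide)]

theorem pvHitM (oc gt : List Char) (i : Nat) : pvHit oc gt "m" "rn" i =
    ((PySem.List.slice gt (some (i:Int)) (some ((i:Int)+2)) == ("rn":String).toList) &&
     ((PySem.List.pyGet? oc (i:Int)).map String.singleton == some "m")) := by
  unfold pvHit; rw [if_neg (by decide)]

theorem pvHitD (oc gt : List Char) (i : Nat) : pvHit oc gt "d" "cl" i =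
    ((PySem.List.slice gt (some (i:Int)) (some ((i:Int)+2)) == ("cl":String).toList) &&
     ((PySem.List.pyGet? oc (i:Int)).map String.singleton == some "d")) := by
  unfold pvHit; rw [if_neg (by decide)]

theorem pvHitW (oc gt : List Char) (i : Nat) : pvHit oc gt "w" "vv" i =
    ((PySem.List.slice gt (some (i:Int)) (some ((i:Int)+2)) == ("vv":String).toList) &&
     ((PySem.List.pyGet? oc (i:Int)).map String.singleton == some "w")) := by
  unfold pvHit; rw [if_neg (by decide)]

-- the events B's sweep emits at position i, as six indicator singletons
def pvEvAt (oc gt : List Char) (i : Nat) : List (String × String) :=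
  ((if pvHit oc gt "rn" "m" i then [("rn","m")] else []) ++
   (if pvHit oc gt "cl" "d" i then [("cl","d")] else []) ++
   (if pvHit oc gt "vv" "w" i then [("vv","w")] else [])) ++
  ((if pvHit oc gt "m" "rn" i then [("m","rn")] else []) ++
   (if pvHit oc gt "d" "cl" i then [("d","cl")] else []) ++
   (if pvHit oc gt "w" "vv" i then [("w","vv")] else []))

-- B's first (2-char-pattern) test at a position, as indicator events
theorem pvB1 (s : List Char) (co : Option Char) (hs : List (String × String)) :
    (match pvVP.get? (String.ofList s) with
      | some tc => if co.map String.singleton == some tc then hs ++ [(String.ofList s, tc)] else hs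
      | none => hs)
    = hs ++ ((if (s == ("rn":String).toList) && (co.map String.singleton == some "m") then [(("rn":String),("m":String))] else []) ++
             (if (s == ("cl":String).toList) && (co.map String.singleton == some "d") then [(("cl":String),("d":String))] else []) ++
             (if (s == ("vv":String).toList) && (co.map String.singleton == some "w") then [(("vv":String),("w":String))] else [])) := by
  rw [pvVP_get?]
  by_cases h1 : s = (['r','n'] : List Char)
  · subst h1
    simp only [beq_iff_eq]
    by_cases hg : co.map String.singleton = some "m" <;> simp [hg, pvOfEq]
  · by_cases h2 : s = (['c','l'] : List Char)
    · subst h2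
      simp only [beq_iff_eq, pvOfEq]
      by_cases hg : co.map String.singleton = some "d" <;> simp [hg, pvOfEq]
    · by_cases h3 : s = (['v','v'] : List Char)
      · subst h3
        simp only [beq_iff_eq, pvOfEq]
        by_cases hg : co.map String.singleton = some "w" <;> simp [hg, pvOfEq]
      · have hm : ∀ (t : String), t.toList.length = 2 → (co.map String.singleton == some t) = false := by
          intro t ht
          rcases co with _ | c
          · rfl
          · have hne : String.singleton c ≠ t := by
              intro hEq
              rw [← hEq] at ht
              simp at ht
            simp [beq_eq_false_iff_ne, hne]
        by_cases h4 : s = (['m'] : List Char)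
        · subst h4
          simp [beq_iff_eq, pvOfEq, hm "rn" (by decide), h1, h2, h3]
        · by_cases h5 : s = (['d'] : List Char)
          · subst h5
            simp [beq_iff_eq, pvOfEq, hm "cl" (by decide), h1, h2, h3]
          · by_cases h6 : s = (['w'] : List Char)
            · subst h6
              simp [beq_iff_eq, pvOfEq, hm "vv" (by decide), h1, h2, h3]
            · simp [beq_iff_eq, pvEqOf', h1, h2, h3, h4, h5, h6]

-- B's second (1-char-pattern) test at a position, as indicator events
theorem pvB2 (co : Option Char) (sg : List Char) (hs : List (String × String)) :
    (match co.map String.singleton with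
     | some one =>
        match pvVP.get? one with
        | some tc => if String.ofList sg == tc then hs ++ [(one, tc)] else hs
        | none => hs
     | none => hs)
    = hs ++ ((if (sg == ("rn":String).toList) && (co.map String.singleton == some "m") then [(("m":String),("rn":String))] else []) ++
             (if (sg == ("cl":String).toList) && (co.map String.singleton == some "d") then [(("d":String),("cl":String))] else []) ++
             (if (sg == ("vv":String).toList) && (co.map String.singleton == some "w") then [(("w":String),("vv":String))] else [])) := by
  rcases co with _ | c
  · simp
  · simp only [Option.map_some]
    rw [pvVP_get?]
    by_cases hc : c = 'm'
    · subst hc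
      by_cases hsg : sg = (['r','n'] : List Char) <;>
        simp [hsg, beq_iff_eq, pvEqSing, pvSingEq, pvOfEq]
    · by_cases hc2 : c = 'd'
      · subst hc2
        by_cases hsg : sg = (['c','l'] : List Char) <;>
          simp [hsg, beq_iff_eq, pvEqSing, pvSingEq, pvOfEq]
      · by_cases hc3 : c = 'w'
        · subst hc3
          by_cases hsg : sg = (['v','v'] : List Char) <;>
            simp [hsg, beq_iff_eq, pvEqSing, pvSingEq, pvOfEq]
        · simp [beq_iff_eq, pvEqSing, pvSingEq, hc, hc2, hc3]

-- one sweep step of B emits exactly pvEvAt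
theorem pvStepB (oc gt : List Char) (i : Nat) (hs : List (String × String)) :
    (let two := String.ofList (PySem.List.slice oc (some (i:Int)) (some ((i:Int)+2)))
     let hs1 := match pvVP.get? two with
      | some tc =>
          if (PySem.List.pyGet? gt (i:Int)).map String.singleton == some tc then hs ++ [(two, tc)] else hs
      | none => hs
     match (PySem.List.pyGet? oc (i:Int)).map String.singleton with
     | some one =>
        match pvVP.get? one with
        | some tc =>
            if String.ofList (PySem.List.slice gt (some (i:Int)) (some ((i:Int)+2))) == tc then hs1 ++ [(one, tc)] else hs1
        | none => hs1
     | none => hs1)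
    = hs ++ pvEvAt oc gt i := by
  show (match (PySem.List.pyGet? oc (i:Int)).map String.singleton with
     | some one =>
        match pvVP.get? one with
        | some tc =>
            if String.ofList (PySem.List.slice gt (some (i:Int)) (some ((i:Int)+2))) == tc then
              (match pvVP.get? (String.ofList (PySem.List.slice oc (some (i:Int)) (some ((i:Int)+2)))) with
                | some tc' =>
                    if (PySem.List.pyGet? gt (i:Int)).map String.singleton == some tc' then
                      hs ++ [(String.ofList (PySem.List.slice oc (some (i:Int)) (some ((i:Int)+2))), tc')]
                    else hs
                | none => hs) ++ [(one, tc)]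
            else
              (match pvVP.get? (String.ofList (PySem.List.slice oc (some (i:Int)) (some ((i:Int)+2)))) with
                | some tc' =>
                    if (PySem.List.pyGet? gt (i:Int)).map String.singleton == some tc' then
                      hs ++ [(String.ofList (PySem.List.slice oc (some (i:Int)) (some ((i:Int)+2))), tc')]
                    else hs
                | none => hs)
        | none =>
            (match pvVP.get? (String.ofList (PySem.List.slice oc (some (i:Int)) (some ((i:Int)+2)))) with
              | some tc' =>
                  if (PySem.List.pyGet? gt (i:Int)).map String.singleton == some tc' then
                    hs ++ [(String.ofList (PySem.List.slice oc (some (i:Int)) (some ((i:Int)+2))), tc')]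
                  else hs
              | none => hs)
     | none =>
        (match pvVP.get? (String.ofList (PySem.List.slice oc (some (i:Int)) (some ((i:Int)+2)))) with
          | some tc' =>
              if (PySem.List.pyGet? gt (i:Int)).map String.singleton == some tc' then
                hs ++ [(String.ofList (PySem.List.slice oc (some (i:Int)) (some ((i:Int)+2))), tc')]
              else hs
          | none => hs))
    = hs ++ pvEvAt oc gt i
  rw [pvB2, pvB1]
  simp only [pvEvAt, pvHitRN, pvHitCL, pvHitVV, pvHitM, pvHitD, pvHitW]
  simp [List.append_assoc]

-- per-key count of the full event stream
theorem pvFlatCount (oc gt : List Char) (r : List Nat) (κ : String × String) :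
    ((r.flatMap (pvEvAt oc gt)).count κ)
    = (if κ = ("rn","m") then r.countP (fun i => pvHit oc gt "rn" "m" i) else 0)
    + (if κ = ("cl","d") then r.countP (fun i => pvHit oc gt "cl" "d" i) else 0)
    + (if κ = ("vv","w") then r.countP (fun i => pvHit oc gt "vv" "w" i) else 0)
    + (if κ = ("m","rn") then r.countP (fun i => pvHit oc gt "m" "rn" i) else 0)
    + (if κ = ("d","cl") then r.countP (fun i => pvHit oc gt "d" "cl" i) else 0)
    + (if κ = ("w","vv") then r.countP (fun i => pvHit oc gt "w" "vv" i) else 0) := by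
  induction r with
  | nil => simp
  | cons i r ih =>
      simp only [List.flatMap_cons, List.count_append, ih, List.countP_cons, pvEvAt]
      by_cases h1 : κ = ("rn","m")
      · subst h1; simp [apply_ite (List.count _)]; split_ifs <;> omega
      · by_cases h2 : κ = ("cl","d")
        · subst h2; simp [apply_ite (List.count _)]; split_ifs <;> omega
        · by_cases h3 : κ = ("vv","w")
          · subst h3; simp [apply_ite (List.count _)]; split_ifs <;> omega
          · by_cases h4 : κ = ("m","rn")
            · subst h4; simp [apply_ite (List.count _)]; split_ifs <;> omega
            · by_cases h5 : κ = ("d","cl")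
              · subst h5; simp [apply_ite (List.count _)]; split_ifs <;> omega
              · by_cases h6 : κ = ("w","vv")
                · subst h6; simp [apply_ite (List.count _)]; split_ifs <;> omega
                · simp [apply_ite (List.count _), h1, h2, h3, h4, h5, h6,
                    List.count_singleton, Ne.symm h1, Ne.symm h2, Ne.symm h3,
                    Ne.symm h4, Ne.symm h5, Ne.symm h6]

-- A's per-pattern scan adds the pattern's hit count at its key
theorem pvLoopA (oc gt : List Char) (p t : String) (r : List Nat) (l : List (String × String × Int))
    (h : (pvKeys l).Nodup) :
    r.foldl (fun acc2 (i : Nat) =>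
      if p.length = 2 then
        if (PySem.List.slice oc (some (i:Int)) (some ((i:Int)+2)) == p.toList) &&
           ((PySem.List.pyGet? gt (i:Int)).map String.singleton == some t) then
          pvDictIncrA p t acc2
        else acc2
      else
        if (PySem.List.slice gt (some (i:Int)) (some ((i:Int)+2)) == t.toList) &&
           ((PySem.List.pyGet? oc (i:Int)).map String.singleton == some p) then
          pvDictIncrA p t acc2
        else acc2) l
    = pvAddFn (fun k => if k = (p, t) then ((r.countP (fun i => pvHit oc gt p t i) : Nat) : Int) else 0) l := by
  have hb : (fun (acc2 : List (String × String × Int)) (i : Nat) =>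
      if p.length = 2 then
        if (PySem.List.slice oc (some (i:Int)) (some ((i:Int)+2)) == p.toList) &&
           ((PySem.List.pyGet? gt (i:Int)).map String.singleton == some t) then
          pvDictIncrA p t acc2
        else acc2
      else
        if (PySem.List.slice gt (some (i:Int)) (some ((i:Int)+2)) == t.toList) &&
           ((PySem.List.pyGet? oc (i:Int)).map String.singleton == some p) then
          pvDictIncrA p t acc2
        else acc2)
      = (fun acc2 (i : Nat) => if pvHit oc gt p t i then pvDictIncrA p t acc2 else acc2) := by
    funext acc2 i
    unfold pvHit
    by_cases hp : p.length = 2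
    · simp only [if_pos hp]
    · simp only [if_neg hp]
  rw [hb]
  exact pvCondFold _ p t r l h

-- A in normal form: one pvAddFn with the six per-key hit counts
theorem pvAEq (ocr_word gt_word : String) (vmm : List (String × String × Int))
    (h : (pvKeys vmm).Nodup) :
    detect_visual_errors ocr_word gt_word vmm
    = pvAddFn (fun k =>
        (if k = ("rn","m") then (((List.range (min ocr_word.toList.length gt_word.toList.length)).countP (fun i => pvHit ocr_word.toList gt_word.toList "rn" "m" i) : Nat) : Int) else 0)
      + (if k = ("cl","d") then (((List.range (min ocr_word.toList.length gt_word.toList.length)).countP (fun i => pvHit ocr_word.toList gt_word.toList "cl" "d" i) : Nat) : Int) else 0)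
      + (if k = ("vv","w") then (((List.range (min ocr_word.toList.length gt_word.toList.length)).countP (fun i => pvHit ocr_word.toList gt_word.toList "vv" "w" i) : Nat) : Int) else 0)
      + (if k = ("m","rn") then (((List.range (min ocr_word.toList.length gt_word.toList.length)).countP (fun i => pvHit ocr_word.toList gt_word.toList "m" "rn" i) : Nat) : Int) else 0)
      + (if k = ("d","cl") then (((List.range (min ocr_word.toList.length gt_word.toList.length)).countP (fun i => pvHit ocr_word.toList gt_word.toList "d" "cl" i) : Nat) : Int) else 0)
      + (if k = ("w","vv") then (((List.range (min ocr_word.toList.length gt_word.toList.length)).countP (fun i => pvHit ocr_word.toList gt_word.toList "w" "vv" i) : Nat) : Int) else 0)) vmm := by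
  have hItems : PySem.Dict.items pvVP = [("rn","m"),("cl","d"),("vv","w"),("m","rn"),("d","cl"),("w","vv")] := by decide
  simp only [detect_visual_errors, hItems, List.foldl_cons, List.foldl_nil]
  rw [pvLoopA _ _ "rn" "m" _ _ h]
  rw [pvLoopA _ _ "cl" "d" _ _ (by rw [pvKeys_addFn]; exact h)]
  rw [pvAddFn_comp]
  rw [pvLoopA _ _ "vv" "w" _ _ (by rw [pvKeys_addFn]; exact h)]
  rw [pvAddFn_comp]
  rw [pvLoopA _ _ "m" "rn" _ _ (by rw [pvKeys_addFn]; exact h)]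
  rw [pvAddFn_comp]
  rw [pvLoopA _ _ "d" "cl" _ _ (by rw [pvKeys_addFn]; exact h)]
  rw [pvAddFn_comp]
  rw [pvLoopA _ _ "w" "vv" _ _ (by rw [pvKeys_addFn]; exact h)]
  rw [pvAddFn_comp]

-- B in normal form: one pvAddFn with the event-stream counts
theorem pvBEq (ocr_word gt_word : String) (vmm : List (String × String × Int))
    (h : (pvKeys vmm).Nodup) :
    detect_visual_errors_alt ocr_word gt_word vmm
    = pvAddFn (fun k =>
        ((((List.range (min ocr_word.toList.length gt_word.toList.length)).flatMap (pvEvAt ocr_word.toList gt_word.toList)).count k : Nat) : Int)) vmm := by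
  simp only [detect_visual_errors_alt]
  have hstep : (fun (hs : List (String × String)) (i : Nat) =>
      let two := String.ofList (PySem.List.slice ocr_word.toList (some (i:Int)) (some ((i:Int)+2)))
      let hs1 := match pvVP.get? two with
        | some tc =>
            if (PySem.List.pyGet? gt_word.toList (i:Int)).map String.singleton == some tc then hs ++ [(two, tc)] else hs
        | none => hs
      match (PySem.List.pyGet? ocr_word.toList (i:Int)).map String.singleton with
      | some one =>
          match pvVP.get? one with
          | some tc =>
              if String.ofList (PySem.List.slice gt_word.toList (some (i:Int)) (some ((i:Int)+2))) == tc then hs1 ++ [(one, tc)] else hs1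
          | none => hs1
      | none => hs1)
      = (fun hs (i : Nat) => hs ++ pvEvAt ocr_word.toList gt_word.toList i) := by
    funext hs i
    exact pvStepB ocr_word.toList gt_word.toList i hs
  rw [hstep, PySem.List.foldl_append_eq_flatMap, List.nil_append]
  exact pvFoldIncrB _ vmm h

-- ===== VERDICT (by name: the statement is the Claim_ definition above) =====
theorem detect_visual_errors_spec : Claim_equal_detect_visual_errors := by
  intro ocr_word gt_word vmm _hDom hPre
  unfold Spec_detect_visual_errors
  have h : (pvKeys vmm).Nodup := hPre.1
  rw [pvAEq ocr_word gt_word vmm h, pvBEq ocr_word gt_word vmm h]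
  apply pvAddFn_congr
  intro k
  rw [pvFlatCount]
  by_cases h1 : k = ("rn","m")
  · subst h1; simp
  · by_cases h2 : k = ("cl","d")
    · subst h2; simp
    · by_cases h3 : k = ("vv","w")
      · subst h3; simp
      · by_cases h4 : k = ("m","rn")
        · subst h4; simp
        · by_cases h5 : k = ("d","cl")
          · subst h5; simp
          · by_cases h6 : k = ("w","vv")
            · subst h6; simp
            · simp [h1, h2, h3, h4, h5, h6]
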